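-- pv_equiv track=rewrite | github.com/OhSeungWan/bmad-assist | src/bmad_assist/dashboard/server.py | _get_story_phases
-- ===== SOURCE A (Python) =====
-- def _get_story_phases(
--     epic_id: str | int, story_id: str | int, status: str
-- ) -> list[dict[str, str]]:
--     """Get workflow phases for a story.
--
--     Args:
--         epic_id: Epic identifier.
--         story_id: Story identifier (just the number part).
--         status: Story status.
--
--     Returns:
--         List of phase dictionaries with status.
--
--     """
--     phases = [
--         {"name": "create-story", "status": "pending"},
--         {"name": "validate", "status": "pending"},
--         {"name": "validation-synthesis", "status": "pending"},
--         {"name": "dev-story", "status": "pending"},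
--         {"name": "code-review", "status": "pending"},
--         {"name": "review-synthesis", "status": "pending"},
--     ]
--
--     # Determine phase statuses based on story status
--     status_progression = {
--         "backlog": 0,
--         "ready-for-dev": 3,  # create + validate + synthesis done
--         "in-progress": 4,  # dev-story in progress
--         "review": 5,  # dev done, review in progress
--         "done": 6,  # all done
--     }
--
--     completed_phases = status_progression.get(status, 0)
--
--     for i, phase in enumerate(phases):
--         if i < completed_phases:
--             phase["status"] = "completed"
--         elif i == completed_phases and status not in ("backlog", "done"):
--             phase["status"] = "in-progress"
--
--     return phases
-- ===== SOURCE B (Python) =====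
-- def _get_story_phases(epic_id, story_id, status):
--     names = [
--         "create-story",
--         "validate",
--         "validation-synthesis",
--         "dev-story",
--         "code-review",
--         "review-synthesis",
--     ]
--     progression = {
--         "backlog": 0,
--         "ready-for-dev": 3,
--         "in-progress": 4,
--         "review": 5,
--         "done": 6,
--     }
--     completed = progression.get(status, 0)
--     active = 1 if status not in ("backlog", "done") and completed < 6 else 0
--     statuses = (
--         ["completed"] * completed
--         + ["in-progress"] * active
--         + ["pending"] * (6 - completed - active)
--     )
--     return [{"name": n, "status": s} for n, s in zip(names, statuses)]
-- ===== Notes on version B (the rewrite author's own statement) =====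
-- stated objective: simpler
-- what changed: B builds the six statuses as three concatenated repeated segments (completed/in-progress/pending) from the progression count and zips them with the fixed names, instead of A's per-index branch comparison over mutable dicts.
import Mathlib
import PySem

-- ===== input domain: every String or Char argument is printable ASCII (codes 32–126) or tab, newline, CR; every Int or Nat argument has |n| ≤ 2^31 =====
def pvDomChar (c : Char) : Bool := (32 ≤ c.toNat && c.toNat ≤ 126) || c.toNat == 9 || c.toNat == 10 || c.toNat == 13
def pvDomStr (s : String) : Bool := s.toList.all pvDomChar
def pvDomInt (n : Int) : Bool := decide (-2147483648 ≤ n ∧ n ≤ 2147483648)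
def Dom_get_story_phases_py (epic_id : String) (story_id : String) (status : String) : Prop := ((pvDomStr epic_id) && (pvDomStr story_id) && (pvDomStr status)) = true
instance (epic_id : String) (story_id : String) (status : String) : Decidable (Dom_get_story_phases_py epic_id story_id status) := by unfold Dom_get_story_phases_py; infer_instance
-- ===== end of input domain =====

-- B builds the six statuses as three concatenated repeated segments from the progression count
-- and zips them with the fixed names, replacing A's per-index branch loop (objective: simpler).


-- ===== PORT A =====
-- phase["status"] = v on a dict is an in-place overwrite; ported via PySem.Dict.insert on the
-- phase's pair list (overwrite keeps position), exact for these literal two-key dicts.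
def get_story_phases_py (_epic_id : String) (_story_id : String) (status : String) : List (List (String × String)) :=
  let phases : List (List (String × String)) :=
    [[("name", "create-story"), ("status", "pending")],
     [("name", "validate"), ("status", "pending")],
     [("name", "validation-synthesis"), ("status", "pending")],
     [("name", "dev-story"), ("status", "pending")],
     [("name", "code-review"), ("status", "pending")],
     [("name", "review-synthesis"), ("status", "pending")]]
  let status_progression : PySem.Dict String Int :=
    PySem.Dict.ofList [("backlog", 0), ("ready-for-dev", 3), ("in-progress", 4), ("review", 5), ("done", 6)]
  let completed_phases := status_progression.getD status 0
  (PySem.List.enumerate phases).map (fun (p : Int × List (String × String)) =>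
    if p.1 < completed_phases then
      ((PySem.Dict.mk p.2).insert "status" "completed").items
    else if p.1 = completed_phases ∧ ¬(status = "backlog" ∨ status = "done") then
      ((PySem.Dict.mk p.2).insert "status" "in-progress").items
    else p.2)

-- ===== PORT B =====
def get_story_phases_py_alt (_epic_id : String) (_story_id : String) (status : String) : List (List (String × String)) :=
  let names : List String :=
    ["create-story", "validate", "validation-synthesis", "dev-story", "code-review", "review-synthesis"]
  let progression : PySem.Dict String Int :=
    PySem.Dict.ofList [("backlog", 0), ("ready-for-dev", 3), ("in-progress", 4), ("review", 5), ("done", 6)]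
  let completed := progression.getD status 0
  let active : Int := if ¬(status = "backlog" ∨ status = "done") ∧ completed < 6 then 1 else 0
  let statuses : List String :=
    List.replicate completed.toNat "completed" ++ List.replicate active.toNat "in-progress"
      ++ List.replicate (6 - completed - active).toNat "pending"
  (names.zip statuses).map (fun p => [("name", p.1), ("status", p.2)])

-- ===== PRECONDITION & SPEC =====
def Spec_get_story_phases_py (epic_id : String) (story_id : String) (status : String) (out : List (List (String × String))) : Prop := out = get_story_phases_py_alt epic_id story_id status
instance (epic_id : String) (story_id : String) (status : String) (out : List (List (String × String))) : Decidable (Spec_get_story_phases_py epic_id story_id status out) := by unfold Spec_get_story_phases_py; infer_instance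

-- ===== CLAIM (what is proved, stated in full; the proofs are below) =====
def Claim_equal_get_story_phases_py : Prop := ∀ (epic_id : String) (story_id : String) (status : String), Dom_get_story_phases_py epic_id story_id status → Spec_get_story_phases_py epic_id story_id status (get_story_phases_py epic_id story_id status)

-- ===== LEMMAS AND PROOFS =====

-- For a status outside the progression table both sides behave like the unknown status "".
lemma get_story_phases_default (status : String)
    (h1 : status ≠ "backlog") (h2 : status ≠ "ready-for-dev") (h3 : status ≠ "in-progress")
    (h4 : status ≠ "review") (h5 : status ≠ "done") :
    get_story_phases_py "" "" status = get_story_phases_py_alt "" "" status := by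
  have b1 : ("backlog" == status) = false := by simp; exact fun h => h1 h.symm
  have b2 : ("ready-for-dev" == status) = false := by simp; exact fun h => h2 h.symm
  have b3 : ("in-progress" == status) = false := by simp; exact fun h => h3 h.symm
  have b4 : ("review" == status) = false := by simp; exact fun h => h4 h.symm
  have b5 : ("done" == status) = false := by simp; exact fun h => h5 h.symm
  have hget : (PySem.Dict.ofList [("backlog", (0:Int)), ("ready-for-dev", 3), ("in-progress", 4),
      ("review", 5), ("done", 6)]).getD status 0 = 0 := by
    simp [PySem.Dict.getD, PySem.Dict.ofList, PySem.Dict.update, PySem.Dict.empty,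
      PySem.Dict.insert, PySem.Dict.get?, PySem.Dict.contains, List.find?, b1, b2, b3, b4, b5]
  simp [get_story_phases_py, get_story_phases_py_alt, hget, h1, h5,
    PySem.List.enumerate, PySem.Dict.insert, PySem.Dict.contains]

-- ===== VERDICT (by name: the statement is the Claim_ definition above) =====
theorem get_story_phases_py_spec : Claim_equal_get_story_phases_py := by
  intro epic_id story_id status _
  unfold Spec_get_story_phases_py
  have hA : get_story_phases_py epic_id story_id status = get_story_phases_py "" "" status := rfl
  have hB : get_story_phases_py_alt epic_id story_id status = get_story_phases_py_alt "" "" status := rfl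
  rw [hA, hB]
  by_cases h1 : status = "backlog"; · subst h1; decide
  by_cases h2 : status = "ready-for-dev"; · subst h2; decide
  by_cases h3 : status = "in-progress"; · subst h3; decide
  by_cases h4 : status = "review"; · subst h4; decide
  by_cases h5 : status = "done"; · subst h5; decide
  exact get_story_phases_default status h1 h2 h3 h4 h5
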